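-- pv_equiv track=rewrite | github.com/John-Wensink/Week-7 | Authoring Assistant.py | replace_punctuation_2
-- ===== SOURCE A (Python) =====
-- def replace_punctuation_2(sample_text, exclamation_count=0, semicolon_count=0):
--     edited_sample_text = ''
--     for char in sample_text:
--         if char != '!' and char != ';':
--             edited_sample_text += char
--         if char == '!':
--             edited_sample_text += '.'
--             exclamation_count += 1
--         if char == ';':
--             edited_sample_text += ','
--             semicolon_count += 1
--     return edited_sample_text, exclamation_count, semicolon_count
-- ===== SOURCE B (Python) =====
-- _TABLE = str.maketrans({'!': '.', ';': ','})
--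
-- def replace_punctuation_2(sample_text, exclamation_count=0, semicolon_count=0):
--     return (sample_text.translate(_TABLE),
--             exclamation_count + sample_text.count('!'),
--             semicolon_count + sample_text.count(';'))
-- ===== Notes on version B (the rewrite author's own statement) =====
-- stated objective: simpler
-- what changed: A's single fused character loop that accumulates the edited string and both counters together is replaced by a table-driven str.translate for the substitution plus two independent str.count scans for the counters; no explicit loop or shared accumulator remains.
import Mathlib
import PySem

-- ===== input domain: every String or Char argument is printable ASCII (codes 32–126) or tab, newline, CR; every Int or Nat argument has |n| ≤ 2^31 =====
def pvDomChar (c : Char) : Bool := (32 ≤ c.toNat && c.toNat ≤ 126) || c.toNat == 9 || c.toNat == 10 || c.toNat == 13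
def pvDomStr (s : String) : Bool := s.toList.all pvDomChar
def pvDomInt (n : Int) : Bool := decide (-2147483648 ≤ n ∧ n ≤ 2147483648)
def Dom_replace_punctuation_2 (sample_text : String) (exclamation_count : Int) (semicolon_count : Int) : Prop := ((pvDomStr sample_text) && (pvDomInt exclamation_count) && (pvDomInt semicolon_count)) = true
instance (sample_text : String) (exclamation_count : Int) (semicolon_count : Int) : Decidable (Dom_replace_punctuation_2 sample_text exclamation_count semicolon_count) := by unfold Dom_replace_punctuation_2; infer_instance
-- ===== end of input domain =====

-- B replaces A's fused accumulating character loop by a table-driven per-character substitution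
-- plus two independent occurrence counts (objective: simpler decomposition, same O-cost per char).

-- ===== PORT A =====
-- one step of A's loop body, on state (edited_sample_text, exclamation_count, semicolon_count)
def pvAStep (st : List Char × Int × Int) (c : Char) : List Char × Int × Int :=
  let st1 := if c ≠ '!' ∧ c ≠ ';' then (st.1 ++ [c], st.2.1, st.2.2) else st
  let st2 := if c = '!' then (st1.1 ++ ['.'], st1.2.1 + 1, st1.2.2) else st1
  if c = ';' then (st2.1 ++ [','], st2.2.1, st2.2.2 + 1) else st2

def replace_punctuation_2 (sample_text : String) (exclamation_count : Int) (semicolon_count : Int) : String × Int × Int :=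
  let st := sample_text.toList.foldl pvAStep ([], exclamation_count, semicolon_count)
  (String.ofList st.1, st.2.1, st.2.2)

-- ===== PORT B =====
-- the translation table {'!': '.', ';': ','} as a function
def pvSubst (c : Char) : Char := if c = '!' then '.' else if c = ';' then ',' else c

def replace_punctuation_2_alt (sample_text : String) (exclamation_count : Int) (semicolon_count : Int) : String × Int × Int :=
  (String.ofList (sample_text.toList.map pvSubst),
   exclamation_count + PySem.List.count sample_text.toList '!',
   semicolon_count + PySem.List.count sample_text.toList ';')

-- ===== PRECONDITION & SPEC =====
def Spec_replace_punctuation_2 (sample_text : String) (exclamation_count : Int) (semicolon_count : Int) (out : String × Int × Int) : Prop := out = replace_punctuation_2_alt sample_text exclamation_count semicolon_count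
instance (sample_text : String) (exclamation_count : Int) (semicolon_count : Int) (out : String × Int × Int) : Decidable (Spec_replace_punctuation_2 sample_text exclamation_count semicolon_count out) := by unfold Spec_replace_punctuation_2; infer_instance

-- ===== CLAIM (what is proved, stated in full; the proofs are below) =====
def Claim_equal_replace_punctuation_2 : Prop := ∀ (sample_text : String) (exclamation_count : Int) (semicolon_count : Int), Dom_replace_punctuation_2 sample_text exclamation_count semicolon_count → Spec_replace_punctuation_2 sample_text exclamation_count semicolon_count (replace_punctuation_2 sample_text exclamation_count semicolon_count)

-- ===== LEMMAS AND PROOFS =====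
theorem pvFoldl_eq (l : List Char) (ed : List Char) (e s : Int) :
    l.foldl pvAStep (ed, e, s) =
      (ed ++ l.map pvSubst, e + PySem.List.count l '!', s + PySem.List.count l ';') := by
  induction l generalizing ed e s with
  | nil => simp [PySem.List.count]
  | cons c l ih =>
    by_cases h1 : c = '!'
    · subst h1
      simp [List.foldl_cons, pvAStep, ih, pvSubst, PySem.List.count]
      omega
    · by_cases h2 : c = ';'
      · subst h2
        simp [List.foldl_cons, pvAStep, ih, pvSubst, PySem.List.count]
        omega
      · simp [List.foldl_cons, pvAStep, h1, h2, ih, pvSubst, PySem.List.count]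

-- ===== VERDICT (by name: the statement is the Claim_ definition above) =====
theorem replace_punctuation_2_spec : Claim_equal_replace_punctuation_2 := by
  intro t e s _
  unfold Spec_replace_punctuation_2 replace_punctuation_2 replace_punctuation_2_alt
  simp [pvFoldl_eq]
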